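-- pv_equiv track=rewrite | github.com/Almazishe/algorithms | yandex-practicum/Самое длинное слово/main.py | solution
-- ===== SOURCE A (Python) =====
-- def solution(sentence):
--     res_word = ""
--     res_length = 0
--
--     temp_word = ""
--     temp_length = 0
--
--     for letter in sentence:
--         if letter.isspace():
--             temp_word = ""
--             temp_length = 0
--         else:
--             temp_word += letter
--             temp_length += 1
--
--         if temp_length > res_length:
--             res_word = temp_word
--             res_length = temp_length
--
--     return f"{res_word}\n{res_length}"
-- ===== SOURCE B (Python) =====
-- def solution(sentence):
--     words = sentence.split()
--     if not words:
--         return "\n0"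
--     longest = max(words, key=len)
--     return f"{longest}\n{len(longest)}"
-- ===== Notes on version B (the rewrite author's own statement) =====
-- stated objective: faster
-- what changed: Replaces the character-by-character scan that rebuilds a temp word with string concatenation and updates a running best by split() plus max(words, key=len), which picks the first word of maximal length exactly like A's strict-greater update.
import Mathlib
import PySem

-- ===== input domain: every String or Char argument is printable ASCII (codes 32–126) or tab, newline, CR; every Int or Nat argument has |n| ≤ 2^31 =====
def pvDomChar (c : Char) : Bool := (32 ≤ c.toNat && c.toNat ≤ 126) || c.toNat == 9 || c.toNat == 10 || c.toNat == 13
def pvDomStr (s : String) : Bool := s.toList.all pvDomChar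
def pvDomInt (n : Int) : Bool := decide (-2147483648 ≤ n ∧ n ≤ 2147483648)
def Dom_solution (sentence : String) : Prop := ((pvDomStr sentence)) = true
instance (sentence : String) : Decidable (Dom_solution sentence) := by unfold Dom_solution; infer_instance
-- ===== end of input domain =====

-- B replaces A's char-by-char scan (which rebuilds a temp word by concatenation, quadratic in the worst case) by split() and max(key=len).

-- ===== PORT A =====
-- one iteration of A's for-loop over the state (res_word, res_length, temp_word, temp_length)
def aStep (st : List Char × Int × List Char × Int) (letter : Char) : List Char × Int × List Char × Int :=
  match st with
  | (resW, resL, tempW, tempL) =>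
    let t := if PySem.Chars.isspace letter then (([] : List Char), (0 : Int))
             else (tempW ++ [letter], tempL + 1)
    if t.2 > resL then (t.1, t.2, t.1, t.2) else (resW, resL, t.1, t.2)

def solution (sentence : String) : String :=
  let fin := sentence.toList.foldl aStep ([], 0, [], 0)
  String.ofList (fin.1 ++ '\n' :: PySem.Int.toChars fin.2.1)

-- ===== PORT B =====
-- sentence.split() is PySem.Chars.split₀ on the char list; max(words, key=len) is PySem.List.max? (first maximal)
def solution_alt (sentence : String) : String :=
  let words := PySem.Chars.split₀ sentence.toList
  match PySem.List.max? words (fun w => (w.length : Int)) with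
  | none => "\n0"
  | some longest => String.ofList (longest ++ '\n' :: PySem.Int.toChars ((longest.length : Int)))

-- ===== PRECONDITION & SPEC =====
def Spec_solution (sentence : String) (out : String) : Prop := out = solution_alt sentence
instance (sentence : String) (out : String) : Decidable (Spec_solution sentence out) := by unfold Spec_solution; infer_instance

-- ===== CLAIM (what is proved, stated in full; the proofs are below) =====
def Claim_equal_solution : Prop := ∀ (sentence : String), Dom_solution sentence → Spec_solution sentence (solution sentence)

-- ===== LEMMAS AND PROOFS =====

-- the words of (cur ++ cs) given that cur (no spaces) is the partial word in progress
def wordsAux : List Char → List Char → List (List Char)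
  | cur, [] => if cur = [] then [] else [cur]
  | cur, c :: rest =>
    if PySem.Chars.isspace c then
      (if cur = [] then wordsAux [] rest else cur :: wordsAux [] rest)
    else wordsAux (cur ++ [c]) rest

-- one whole word's effect on A's (res_word, res_length)
def wStep (acc : List Char × Int) (w : List Char) : List Char × Int :=
  if (w.length : Int) > acc.2 then (w, (w.length : Int)) else acc

-- first word of maximal length, starting from candidate m
def bestW (m : List Char) : List (List Char) → List Char
  | [] => m
  | w :: ws => if (m.length : Int) < (w.length : Int) then bestW w ws else bestW m ws

theorem split₀_go_eq (cs : List Char) : ∀ (cur : List Char) (acc : List (List Char)),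
    PySem.Chars.split₀.go cs cur acc = acc.reverse ++ wordsAux cur.reverse cs := by
  induction cs with
  | nil =>
    intro cur acc
    simp only [PySem.Chars.split₀.go, wordsAux]
    by_cases h : cur = []
    · simp [h]
    · simp [h, List.isEmpty_iff, List.reverse_eq_nil_iff]
  | cons c rest ih =>
    intro cur acc
    simp only [PySem.Chars.split₀.go, wordsAux]
    by_cases hs : PySem.Chars.isspace c
    · by_cases h : cur = []
      · simp [hs, h, ih]
      · simp [hs, h, List.isEmpty_iff, List.reverse_eq_nil_iff, ih]
    · simp [hs, ih]

theorem split₀_eq_wordsAux (cs : List Char) : PySem.Chars.split₀ cs = wordsAux [] cs := by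
  simpa using split₀_go_eq cs [] []

theorem nil_not_mem_wordsAux (cs : List Char) : ∀ cur, [] ∉ wordsAux cur cs := by
  induction cs with
  | nil =>
    intro cur
    simp only [wordsAux]
    by_cases h : cur = []
    · simp [h]
    · simp [h, Ne.symm h]
  | cons c rest ih =>
    intro cur
    simp only [wordsAux]
    by_cases hs : PySem.Chars.isspace c
    · by_cases h : cur = []
      · simpa [hs, h] using ih []
      · simpa [hs, h, Ne.symm h] using ih []
    · simpa [hs] using ih (cur ++ [c])

theorem wordsAux_ne_nil (cs : List Char) : ∀ cur, cur ≠ [] →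
    wordsAux cur cs = (cur ++ cs.takeWhile (fun c => !PySem.Chars.isspace c)) ::
      wordsAux [] (cs.dropWhile (fun c => !PySem.Chars.isspace c)) := by
  induction cs with
  | nil => intro cur h; simp [wordsAux, h]
  | cons c rest ih =>
    intro cur h
    by_cases hs : PySem.Chars.isspace c
    · simp [wordsAux, hs, h]
    · simp only [wordsAux, hs, List.takeWhile_cons, List.dropWhile_cons, Bool.not_false, if_true]
      rw [ih (cur ++ [c]) (by simp)]
      simp

-- the core invariant: A's loop computes the wStep-fold of the word list
theorem loop_eq_wordsFold (cs : List Char) : ∀ (rw : List Char) (rl : Int) (cur : List Char),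
    (cur.length : Int) ≤ rl →
    (let fin := cs.foldl aStep (rw, rl, cur, (cur.length : Int));
     (fin.1, fin.2.1)) = (wordsAux cur cs).foldl wStep (rw, rl) := by
  induction cs with
  | nil =>
    intro rw rl cur hle
    simp only [List.foldl_nil, wordsAux]
    by_cases h : cur = []
    · simp [h]
    · simp only [h, if_false, List.foldl_cons, List.foldl_nil, wStep]
      rw [if_neg (by omega)]
  | cons c rest ih =>
    intro rw rl cur hle
    simp only [List.foldl_cons]
    by_cases hs : PySem.Chars.isspace c
    · -- space: temp resets; 0 > rl is false
      have h0 : ¬ ((0 : Int) > rl) := by omega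
      simp only [aStep, hs, reduceIte]
      rw [if_neg h0]
      have := ih rw rl [] (by simp; omega)
      simp only [List.length_nil, Int.natCast_zero] at this
      rw [this]
      simp only [wordsAux, hs, if_true]
      by_cases h : cur = []
      · simp [h]
      · simp only [h, if_false, List.foldl_cons, wStep]
        rw [if_neg (by omega)]
    · -- non-space: temp grows by c
      simp only [aStep, hs, Bool.false_eq_true, reduceIte]
      by_cases hg : (cur.length : Int) + 1 > rl
      · rw [if_pos hg]
        have hlen : ((cur ++ [c]).length : Int) = (cur.length : Int) + 1 := by simp
        have := ih (cur ++ [c]) ((cur.length : Int) + 1) (cur ++ [c]) (by rw [hlen])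
        rw [hlen] at this
        rw [this]
        -- both folds start on a word list whose head extends cur ++ [c]
        rw [wordsAux, if_neg hs, wordsAux_ne_nil rest (cur ++ [c]) (by simp)]
        simp only [List.foldl_cons]
        congr 1
        have hlen' : (cur ++ [c]).length = cur.length + 1 := by simp
        have hW : ((cur ++ [c]) ++ rest.takeWhile (fun c => !PySem.Chars.isspace c)).length
            = (cur ++ [c]).length + (rest.takeWhile (fun c => !PySem.Chars.isspace c)).length := by
          simp only [List.length_append, List.length_cons, List.length_nil]
        by_cases hrun : rest.takeWhile (fun c => !PySem.Chars.isspace c) = []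
        · simp only [wStep, hrun, List.append_nil]
          rw [if_neg (by rw [hlen]; omega), if_pos (by rw [hlen]; omega), hlen]
        · have hT : 0 < (rest.takeWhile (fun c => !PySem.Chars.isspace c)).length :=
            List.length_pos_iff.mpr hrun
          simp only [wStep]
          rw [if_pos (by rw [hW]; push_cast; rw [hlen]; omega),
              if_pos (by rw [hW]; push_cast; rw [hlen]; omega)]
      · rw [if_neg hg]
        have hlen : ((cur ++ [c]).length : Int) = (cur.length : Int) + 1 := by simp
        have := ih rw rl (cur ++ [c]) (by rw [hlen]; omega)
        rw [hlen] at this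
        rw [this, wordsAux, if_neg hs]

theorem wordsFold_eq_bestW (ws : List (List Char)) : ∀ (m : List Char),
    ws.foldl wStep (m, (m.length : Int)) = (bestW m ws, ((bestW m ws).length : Int)) := by
  induction ws with
  | nil => intro m; simp [bestW]
  | cons w ws ih =>
    intro m
    simp only [List.foldl_cons, wStep, bestW]
    by_cases h : ((m.length : Int)) < (w.length : Int)
    · rw [if_pos h, if_pos (by exact h), ih w]
    · rw [if_neg h, if_neg (by exact h), ih m]

def mStep (acc : Option (List Char)) (x : List Char) : Option (List Char) :=
  match acc with
  | none => some x
  | some m => if ((m.length : Int)) < ((x.length : Int)) then some x else some m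

theorem foldl_mStep (ws : List (List Char)) : ∀ (m : List Char),
    ws.foldl mStep (some m) = some (bestW m ws) := by
  induction ws with
  | nil => intro m; simp [bestW]
  | cons w ws ih =>
    intro m
    simp only [List.foldl_cons, mStep, bestW]
    by_cases h : ((m.length : Int)) < (w.length : Int)
    · rw [if_pos h, if_pos h, ih w]
    · rw [if_neg h, if_neg h, ih m]

theorem max?_len_cons (rest : List (List Char)) (m : List Char) :
    PySem.List.max? (m :: rest) (fun w => ((w.length : Int))) = some (bestW m rest) := by
  have h : PySem.List.max? (m :: rest) (fun w => ((w.length : Int))) = rest.foldl mStep (some m) := by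
    simp only [PySem.List.max?, List.foldl_cons]
    apply List.foldl_ext
    intro acc b _
    cases acc <;> rfl
  rw [h]
  exact foldl_mStep rest m

-- ===== VERDICT (by name: the statement is the Claim_ definition above) =====
theorem solution_spec : Claim_equal_solution := by
  intro sentence _
  simp only [Spec_solution, solution, solution_alt]
  rw [split₀_eq_wordsAux]
  have hA := loop_eq_wordsFold sentence.toList [] 0 [] (by simp)
  simp only [List.length_nil, Int.natCast_zero] at hA
  cases hwords : wordsAux [] sentence.toList with
  | nil =>
    rw [hwords] at hA
    simp only [List.foldl_nil] at hA
    rw [show PySem.List.max? ([] : List (List Char)) (fun w => ((w.length : Int))) = none from rfl]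
    have h1 : (sentence.toList.foldl aStep ([], 0, [], 0)).1 = [] := by
      have := congrArg Prod.fst hA; simpa using this
    have h2 : (sentence.toList.foldl aStep ([], 0, [], 0)).2.1 = 0 := by
      have := congrArg Prod.snd hA; simpa using this
    rw [h1, h2]
    decide
  | cons w0 rest =>
    have hw0 : w0 ≠ [] := by
      intro hnil
      exact nil_not_mem_wordsAux sentence.toList [] (by rw [hwords, hnil]; simp)
    have hpos : (0 : Int) < (w0.length : Int) := by
      have : 0 < w0.length := List.length_pos_iff.mpr hw0
      exact_mod_cast this
    rw [hwords] at hA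
    simp only [List.foldl_cons, wStep] at hA
    rw [if_pos (by simpa using hpos)] at hA
    rw [wordsFold_eq_bestW rest w0] at hA
    rw [max?_len_cons rest w0]
    have h1 : (sentence.toList.foldl aStep ([], 0, [], 0)).1 = bestW w0 rest := by
      have := congrArg Prod.fst hA; simpa using this
    have h2 : (sentence.toList.foldl aStep ([], 0, [], 0)).2.1 = ((bestW w0 rest).length : Int) := by
      have := congrArg Prod.snd hA; simpa using this
    rw [h1, h2]
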